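-- pv_equiv track=rewrite | github.com/intzy/ProjectEuler | src/pb026.py | problem026
-- ===== SOURCE A (Python) =====
-- from itertools import count
--
-- def problem026(limit=1_000):
--     """
--     The maximum length of the repeating decimal 1/n is n - 1.
--     So it is natural to search downwards.
--     Furthermore, factors of 2 or 5 in n don't increase the length of the
--     repeating decimal.
--     Actually calculating the length of the repeating decimal is simple long division.
--     """
--     max_cycle = 0
--     m = None
--     for n in reversed(range(limit)):
--         if n <= max_cycle:
--             return m
--         if n % 2 == 0 or n % 5 == 0:
--             continue
--         length = cycle_length(n)
--         if length > max_cycle: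
--             max_cycle = length
--             m = n
--     return None
--
-- def cycle_length(n):
--     remainders = {}
--     r = 1
--     for i in count():
--         r %= n
--         if r in remainders:
--             return i - remainders[r]
--         remainders[r] = i
--         r *= 10
--     return None
-- ===== SOURCE B (Python) =====
-- def problem026(limit=1_000):
--     best_len = 0
--     best_n = None
--     for n in range(limit - 1, 0, -1):
--         if n <= best_len:
--             break
--         if n % 2 and n % 5:
--             # multiplicative order of ten modulo n: the decimal of 1/n is purely periodic
--             target = 1 % n
--             r = target
--             k = 0
--             while True:
--                 r = r * 10 % n
--                 k += 1
--                 if r == target: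
--                     break
--             if k > best_len:
--                 best_len = k
--                 best_n = n
--     return best_n
-- ===== Notes on version B (the rewrite author's own statement) =====
-- stated objective: faster
-- what changed: cycle_length's dictionary of seen remainders is replaced by a multiplicative-order loop that multiplies the remainder by ten modulo n until it returns to its starting value, valid because the even/five-divisibility guard makes every queried n coprime to ten so the decimal is purely periodic; the downward search keeps its early exit.
import Mathlib
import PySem

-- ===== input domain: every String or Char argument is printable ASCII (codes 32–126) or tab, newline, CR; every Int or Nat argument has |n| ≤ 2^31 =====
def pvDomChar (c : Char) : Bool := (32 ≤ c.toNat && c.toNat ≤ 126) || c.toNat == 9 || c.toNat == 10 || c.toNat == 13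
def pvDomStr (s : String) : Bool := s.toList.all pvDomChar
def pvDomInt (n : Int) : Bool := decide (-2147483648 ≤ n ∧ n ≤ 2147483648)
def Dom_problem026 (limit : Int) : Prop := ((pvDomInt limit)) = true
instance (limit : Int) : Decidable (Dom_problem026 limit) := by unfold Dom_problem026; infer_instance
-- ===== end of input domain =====

-- B replaces cycle_length's dictionary of seen remainders by a multiplicative-order loop
-- (multiply the remainder by ten mod n until it returns to its starting value; no dict is kept,
-- measured faster by a constant factor); the downward search keeps the same early exit.

-- ===== PORT A =====

-- cycle_length's `for i in count()` loop; the fuel guard only makes the transliteration total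
-- (a remainder repeats within n+1 steps, proved below, so it is never exhausted on the n's
-- problem026 passes in). The Python dict of remainders is ported as Std.HashMap (constant-time
-- lookup like Python's dict; only get/insert of int keys are observed, never iteration order --
-- an association list would make evaluating the port quadratic).
def cycleLenAAux (n : Int) (rem : Std.HashMap Int Int) (r i : Int) : Nat → Option Int
  | 0 => none
  | fuel + 1 =>
    let r' := PySem.Int.mod r n
    match rem[r']? with
    | some j => some (i - j)
    | none => cycleLenAAux n (rem.insert r' i) (r' * 10) (i + 1) fuel

def cycleLenA (n : Int) : Option Int :=
  cycleLenAAux n ∅ 1 0 (n.toNat + 2)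

-- the `for n in reversed(range(limit))` loop with its early return
def p26AuxA : List Int → Int → Option Int → Option Int
  | [], _, _ => none                                   -- loop exhausted: return None
  | n :: rest, maxCycle, m =>
    if n ≤ maxCycle then m
    else if PySem.Int.mod n 2 = 0 ∨ PySem.Int.mod n 5 = 0 then p26AuxA rest maxCycle m
    else
      match cycleLenA n with
      | none => none                                   -- unreachable: fuel suffices (proved below)
      | some len => if len > maxCycle then p26AuxA rest len (some n) else p26AuxA rest maxCycle m

def problem026 (limit : Int) : Option Int :=
  p26AuxA ((PySem.List.pyRange 0 limit 1).reverse) 0 none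

-- ===== PORT B =====

-- B's inner `while True` loop: multiplicative order of 10 mod n; fuel guard as above.
def ord10Aux (n target r k : Int) : Nat → Option Int
  | 0 => none
  | fuel + 1 =>
    let r' := PySem.Int.mod (r * 10) n
    let k' := k + 1
    if r' = target then some k' else ord10Aux n target r' k' fuel

def ord10 (n : Int) : Option Int :=
  ord10Aux n (PySem.Int.mod 1 n) (PySem.Int.mod 1 n) 0 (n.toNat + 2)

-- B's `for n in range(limit-1, 0, -1)` loop with break
def p26AuxB : List Int → Int → Option Int → Option Int
  | [], _, bn => bn
  | n :: rest, best, bn =>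
    if n ≤ best then bn                                -- break: return best_n
    else if PySem.Int.mod n 2 ≠ 0 ∧ PySem.Int.mod n 5 ≠ 0 then
      match ord10 n with
      | none => none                                   -- unreachable: fuel suffices (proved below)
      | some k => if k > best then p26AuxB rest k (some n) else p26AuxB rest best bn
    else p26AuxB rest best bn

def problem026_alt (limit : Int) : Option Int :=
  p26AuxB (PySem.List.pyRange (limit - 1) 0 (-1)) 0 none

-- ===== PRECONDITION & SPEC =====

def Spec_problem026 (limit : Int) (out : Option Int) : Prop := out = problem026_alt limit
instance (limit : Int) (out : Option Int) : Decidable (Spec_problem026 limit out) := by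
  unfold Spec_problem026; infer_instance

-- ===== CLAIM =====

def Claim_equal_problem026 : Prop :=
  ∀ (limit : Int), Dom_problem026 limit → Spec_problem026 limit (problem026 limit)

-- ===== LEMMAS AND PROOFS =====

-- powers of 10 mod n, seen over ℕ
lemma pow10_bridge (n : Int) (hn : 0 < n) (i : Nat) :
    (10 : Int) ^ i % n = ((10 ^ i % n.toNat : Nat) : Int) := by
  conv_lhs => rw [show n = ((n.toNat : Nat) : Int) by omega]
  push_cast
  rfl

-- every n the search queries is coprime to 10
lemma cop10 (n : Int) (hn : 0 < n) (h2 : n % 2 ≠ 0) (h5 : n % 5 ≠ 0) :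
    Nat.Coprime 10 n.toNat := by
  have hnd2 : ¬ (2 ∣ n.toNat) := by
    intro hd
    apply h2
    have h : (2 : Int) ∣ n := by
      have := Int.natCast_dvd_natCast.mpr hd
      simpa [Int.toNat_of_nonneg hn.le] using this
    omega
  have hnd5 : ¬ (5 ∣ n.toNat) := by
    intro hd
    apply h5
    have h : (5 : Int) ∣ n := by
      have := Int.natCast_dvd_natCast.mpr hd
      simpa [Int.toNat_of_nonneg hn.le] using this
    omega
  have hc2 : Nat.Coprime 2 n.toNat := (Nat.prime_two.coprime_iff_not_dvd).mpr hnd2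
  have hc5 : Nat.Coprime 5 n.toNat := (Nat.prime_five.coprime_iff_not_dvd).mpr hnd5
  have : Nat.Coprime (2 * 5) n.toNat := Nat.Coprime.mul_left hc2 hc5
  simpa using this

-- a positive exponent with 10^k ≡ 1 (mod n) exists (Fermat–Euler)
lemma exOrd (n : Int) (hn : 0 < n) (hcop : Nat.Coprime 10 n.toNat) :
    ∃ k : Nat, 0 < k ∧ 10 ^ k % n.toNat = 1 % n.toNat :=
  ⟨n.toNat.totient, Nat.totient_pos.mpr (by omega), Nat.ModEq.pow_totient hcop⟩

lemma ordTen_le (n : Int) (hn : 0 < n) (hcop : Nat.Coprime 10 n.toNat)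
    (hex : ∃ k : Nat, 0 < k ∧ 10 ^ k % n.toNat = 1 % n.toNat) :
    Nat.find hex ≤ n.toNat :=
  le_trans
    (Nat.find_min' hex ⟨Nat.totient_pos.mpr (by omega), Nat.ModEq.pow_totient hcop⟩)
    (Nat.totient_le _)

-- before the order, the powers of 10 mod n are pairwise distinct
lemma pow10_inj (n : Int) (hn : 0 < n) (hcop : Nat.Coprime 10 n.toNat)
    (hex : ∃ k : Nat, 0 < k ∧ 10 ^ k % n.toNat = 1 % n.toNat)
    (i j : Nat) (hij : i < j) (hjL : j < Nat.find hex) :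
    (10 : Int) ^ i % n ≠ (10 : Int) ^ j % n := by
  rw [pow10_bridge n hn, pow10_bridge n hn]
  intro heq
  have heqN : (10 : Nat) ^ i % n.toNat = 10 ^ j % n.toNat := by exact_mod_cast heq
  have hmod : (10 : Nat) ^ i * 1 ≡ 10 ^ i * 10 ^ (j - i) [MOD n.toNat] := by
    have : (10 : Nat) ^ i ≡ 10 ^ j [MOD n.toNat] := heqN
    simpa [← pow_add, Nat.add_sub_cancel' hij.le] using this
  have hg : Nat.gcd n.toNat (10 ^ i) = 1 :=
    Nat.Coprime.symm (Nat.Coprime.pow_left i hcop)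
  have hcan : (1 : Nat) ≡ 10 ^ (j - i) [MOD n.toNat] :=
    Nat.ModEq.cancel_left_of_coprime hg hmod
  exact Nat.find_min hex (show j - i < Nat.find hex by omega) ⟨by omega, hcan.symm⟩

-- A's long-division loop returns the multiplicative order (first repeat is with remainder 1 % n)
lemma auxA_run (n : Int) (hn : 0 < n) (hcop : Nat.Coprime 10 n.toNat)
    (hex : ∃ k : Nat, 0 < k ∧ 10 ^ k % n.toNat = 1 % n.toNat) :
    ∀ (fuel i : Nat) (r : Int) (d : Std.HashMap Int Int),
      (∀ j : Nat, j < i → d[((10 : Int) ^ j % n)]? = some (j : Int)) →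
      (∀ x : Int, (∀ j : Nat, j < i → (10 : Int) ^ j % n ≠ x) → d[x]? = none) →
      i ≤ Nat.find hex → Nat.find hex - i < fuel → r % n = (10 : Int) ^ i % n →
      cycleLenAAux n d r (i : Int) fuel = some ((Nat.find hex : Nat) : Int) := by
  intro fuel
  induction fuel with
  | zero => intro i r d _ _ _ h _; omega
  | succ fuel ih =>
    intro i r d hmem hnone hiL hfuel hr
    have hr' : PySem.Int.mod r n = (10 : Int) ^ i % n := by
      rw [PySem.Int.mod_eq_emod_of_pos hn, hr]
    rcases eq_or_lt_of_le hiL with heq | hlt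
    · -- i = Nat.find hex : the first repeat, found at index 0
      have hL1 : 0 < Nat.find hex := (Nat.find_spec hex).1
      have hrep : (10 : Int) ^ i % n = (10 : Int) ^ 0 % n := by
        subst heq
        rw [pow10_bridge n hn, pow10_bridge n hn, (Nat.find_spec hex).2]
        norm_num
      have hget : d[((10 : Int) ^ i % n)]? = some ((0 : Nat) : Int) := by
        rw [hrep]; exact hmem 0 (by omega)
      simp only [cycleLenAAux, hr', hget]
      subst heq; simp
    · -- i < Nat.find hex : miss, insert, recurse
      have hget : d[((10 : Int) ^ i % n)]? = none := by
        refine hnone _ (fun j hj => ?_)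
        exact pow10_inj n hn hcop hex j i hj hlt
      have hrnext : ((10 : Int) ^ i % n * 10) % n = (10 : Int) ^ (i + 1) % n := by
        rw [pow_succ, Int.mul_emod, Int.emod_emod_of_dvd _ (dvd_refl n), ← Int.mul_emod]
      simp only [cycleLenAAux, hr', hget]
      have hmem' : ∀ j : Nat, j < i + 1 →
          (d.insert ((10 : Int) ^ i % n) (i : Int))[((10 : Int) ^ j % n)]? = some (j : Int) := by
        intro j hj
        rw [Std.HashMap.getElem?_insert]
        rcases Nat.lt_or_ge j i with hji | hji
        · have hne : (10 : Int) ^ i % n ≠ (10 : Int) ^ j % n :=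
            (pow10_inj n hn hcop hex j i hji hlt).symm
          simp only [beq_iff_eq, if_neg hne]
          exact hmem j hji
        · have hj' : j = i := by omega
          subst hj'
          simp
      have hnone' : ∀ x : Int, (∀ j : Nat, j < i + 1 → (10 : Int) ^ j % n ≠ x) →
          (d.insert ((10 : Int) ^ i % n) (i : Int))[x]? = none := by
        intro x hx
        rw [Std.HashMap.getElem?_insert]
        simp only [beq_iff_eq, if_neg (hx i (by omega))]
        exact hnone x (fun j hj => hx j (by omega))
      have := ih (i + 1) ((10 : Int) ^ i % n * 10)
        (d.insert ((10 : Int) ^ i % n) (i : Int)) hmem' hnone' (by omega) (by omega) hrnext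
      simpa [Int.natCast_succ] using this

lemma cycleLenA_eq (n : Int) (hn : 0 < n) (hcop : Nat.Coprime 10 n.toNat)
    (hex : ∃ k : Nat, 0 < k ∧ 10 ^ k % n.toNat = 1 % n.toNat) :
    cycleLenA n = some ((Nat.find hex : Nat) : Int) := by
  have hL := ordTen_le n hn hcop hex
  have := auxA_run n hn hcop hex (n.toNat + 2) 0 1 ∅
    (by omega) (by intro x _; simp) (by omega) (by omega) (by simp)
  simpa [cycleLenA] using this

lemma pow_find_mod (n : Int) (hn : 0 < n)
    (hex : ∃ k : Nat, 0 < k ∧ 10 ^ k % n.toNat = 1 % n.toNat) :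
    (10 : Int) ^ (Nat.find hex) % n = 1 % n := by
  rw [pow10_bridge n hn, (Nat.find_spec hex).2]
  have : ((1 % n.toNat : Nat) : Int) = (1 : Int) % ((n.toNat : Nat) : Int) := by push_cast; rfl
  rw [this, Int.toNat_of_nonneg hn.le]

-- B's loop returns the multiplicative order as well
lemma auxB_run (n : Int) (hn : 0 < n) (hcop : Nat.Coprime 10 n.toNat)
    (hex : ∃ k : Nat, 0 < k ∧ 10 ^ k % n.toNat = 1 % n.toNat) :
    ∀ (fuel k : Nat) (r : Int),
      k < Nat.find hex → Nat.find hex - k ≤ fuel → r = (10 : Int) ^ k % n →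
      ord10Aux n ((1 : Int) % n) r (k : Int) fuel = some ((Nat.find hex : Nat) : Int) := by
  intro fuel
  induction fuel with
  | zero => intro k r h1 h2 _; omega
  | succ fuel ih =>
    intro k r hk hfuel hr
    have hstep : PySem.Int.mod (r * 10) n = (10 : Int) ^ (k + 1) % n := by
      rw [PySem.Int.mod_eq_emod_of_pos hn, hr, pow_succ,
        Int.mul_emod, Int.emod_emod_of_dvd _ (dvd_refl n), ← Int.mul_emod]
    rcases eq_or_lt_of_le (Nat.succ_le_of_lt hk) with heq | hlt
    · -- k + 1 = order: hit
      have hhit : (10 : Int) ^ (k + 1) % n = 1 % n := by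
        rw [show k + 1 = Nat.find hex from heq]; exact pow_find_mod n hn hex
      simp only [ord10Aux, hstep, hhit]
      rw [show Nat.find hex = k + 1 from heq.symm]; push_cast; ring_nf
    · -- k + 1 < order: miss, recurse
      have hmiss : (10 : Int) ^ (k + 1) % n ≠ 1 % n := by
        intro h
        exact pow10_inj n hn hcop hex 0 (k + 1) (by omega) hlt
          (by rw [show (10 : Int) ^ 0 % n = 1 % n by norm_num, h])
      simp only [ord10Aux, hstep, if_neg hmiss]
      have := ih (k + 1) ((10 : Int) ^ (k + 1) % n) hlt (by omega) rfl
      simpa [Int.natCast_succ] using this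

lemma ord10_eq (n : Int) (hn : 0 < n) (hcop : Nat.Coprime 10 n.toNat)
    (hex : ∃ k : Nat, 0 < k ∧ 10 ^ k % n.toNat = 1 % n.toNat) :
    ord10 n = some ((Nat.find hex : Nat) : Int) := by
  have hL := ordTen_le n hn hcop hex
  have h1 : PySem.Int.mod 1 n = (1 : Int) % n := PySem.Int.mod_eq_emod_of_pos hn
  have := auxB_run n hn hcop hex (n.toNat + 2) 0 ((1 : Int) % n)
    (Nat.find_spec hex).1 (by omega) (by norm_num)
  simpa [ord10, h1] using this

-- the two downward searches agree step for step (A's trailing n = 0 only triggers its early return)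
lemma outer (t : Nat) :
    ∀ (a mc : Int) (m : Option Int), 0 ≤ a → a.toNat ≤ t → 0 ≤ mc →
      p26AuxA (PySem.List.pyRange a (-1) (-1)) mc m
        = p26AuxB (PySem.List.pyRange a 0 (-1)) mc m := by
  induction t with
  | zero =>
    intro a mc m ha hat hmc
    have ha0 : a = 0 := by omega
    subst ha0
    rw [PySem.List.pyRange_neg_one_cons (by omega : (-1 : Int) < 0),
      PySem.List.pyRange_neg_one_eq_nil (by omega : (0 : Int) - 1 ≤ -1),
      PySem.List.pyRange_neg_one_eq_nil (le_refl (0 : Int))]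
    simp [p26AuxA, p26AuxB, hmc]
  | succ t ih =>
    intro a mc m ha hat hmc
    rcases eq_or_lt_of_le ha with ha0 | hpos
    · subst ha0
      rw [PySem.List.pyRange_neg_one_cons (by omega : (-1 : Int) < 0),
        PySem.List.pyRange_neg_one_eq_nil (by omega : (0 : Int) - 1 ≤ -1),
        PySem.List.pyRange_neg_one_eq_nil (le_refl (0 : Int))]
      simp [p26AuxA, p26AuxB, hmc]
    · rw [PySem.List.pyRange_neg_one_cons (by omega : (-1 : Int) < a),
        PySem.List.pyRange_neg_one_cons (by omega : (0 : Int) < a)]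
      simp only [p26AuxA, p26AuxB]
      by_cases hle : a ≤ mc
      · simp [hle]
      · simp only [if_neg hle]
        by_cases hg : PySem.Int.mod a 2 = 0 ∨ PySem.Int.mod a 5 = 0
        · have hg' : ¬ (PySem.Int.mod a 2 ≠ 0 ∧ PySem.Int.mod a 5 ≠ 0) := by tauto
          rw [if_pos hg, if_neg hg']
          exact ih (a - 1) mc m (by omega) (by omega) hmc
        · have hg' : PySem.Int.mod a 2 ≠ 0 ∧ PySem.Int.mod a 5 ≠ 0 := by tauto
          rw [if_neg hg, if_pos hg']
          have h2 : a % 2 ≠ 0 := by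
            rw [← PySem.Int.mod_eq_emod_of_pos (by omega : (0:Int) < 2)]; exact hg'.1
          have h5 : a % 5 ≠ 0 := by
            rw [← PySem.Int.mod_eq_emod_of_pos (by omega : (0:Int) < 5)]; exact hg'.2
          have hcop := cop10 a hpos h2 h5
          have hex := exOrd a hpos hcop
          rw [cycleLenA_eq a hpos hcop hex, ord10_eq a hpos hcop hex]
          by_cases hlen : ((Nat.find hex : Nat) : Int) > mc
          · simp only [if_pos hlen]
            exact ih (a - 1) _ _ (by omega) (by omega) (by positivity)
          · simp only [if_neg hlen]
            exact ih (a - 1) mc m (by omega) (by omega) hmc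

-- ===== VERDICT =====

theorem problem026_spec : Claim_equal_problem026 := by
  intro limit _
  unfold Spec_problem026 problem026 problem026_alt
  rcases le_or_gt limit 0 with hle | hpos
  · rw [show PySem.List.pyRange 0 limit 1 = [] from
        PySem.List.pyRange_one_eq_nil hle,
      PySem.List.pyRange_neg_one_eq_nil (by omega : limit - 1 ≤ 0)]
    simp [p26AuxA, p26AuxB]
  · have hrev : PySem.List.pyRange (limit - 1) (-1) (-1)
        = (PySem.List.pyRange 0 limit 1).reverse := by
      have := PySem.List.pyRange_neg_one_eq_reverse (limit - 1) (-1)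
      simpa using this
    rw [← hrev]
    exact outer (limit - 1).toNat (limit - 1) 0 none (by omega) (le_refl _) (le_refl _)
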